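-- pv_equiv track=rewrite | github.com/samalsubrat/5Sem | Python/Major Assignment-2/mainProg.py | analyze_cities_traditional
-- ===== SOURCE A (Python) =====
-- def analyze_cities_traditional(cleaned_cities, previous_intel):
--     cleaned_list = list(cleaned_cities)
--     intel_list = list(previous_intel)
--
--     all_cities = cleaned_list.copy()
--     for city in intel_list:
--         if city not in all_cities:
--             all_cities.append(city)
--
--     unique_cities = []
--     for city in all_cities:
--         if (city in cleaned_list and city not in intel_list) or (city in intel_list and city not in cleaned_list):
--             unique_cities.append(city)
--
--     high_alert = []
--     for city in cleaned_list:
--         if city in intel_list: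
--             high_alert.append(city)
--
--     return set(all_cities), set(unique_cities), set(high_alert)
-- ===== SOURCE B (Python) =====
-- def analyze_cities_traditional(cleaned_cities, previous_intel):
--     # One classification table: city -> (in_cleaned, in_intel), then a single pass over it.
--     flags = {}
--     for city in cleaned_cities:
--         flags[city] = (True, False)
--     for city in previous_intel:
--         in_cleaned = flags.get(city, (False, False))[0]
--         flags[city] = (in_cleaned, True)
--     all_cities = set()
--     unique_cities = set()
--     high_alert = set()
--     for city, (in_cleaned, in_intel) in flags.items():
--         all_cities.add(city)
--         if in_cleaned != in_intel:
--             unique_cities.add(city)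
--         if in_cleaned and in_intel:
--             high_alert.add(city)
--     return all_cities, unique_cities, high_alert
-- ===== Notes on version B (the rewrite author's own statement) =====
-- stated objective: faster
-- what changed: Replaces A's three loops with quadratic list-membership scans by one classification dict (city -> (in_cleaned, in_intel) flags) built in a single walk over each input, then one pass over the dict items emitting all three sets at once.
import Mathlib
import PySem

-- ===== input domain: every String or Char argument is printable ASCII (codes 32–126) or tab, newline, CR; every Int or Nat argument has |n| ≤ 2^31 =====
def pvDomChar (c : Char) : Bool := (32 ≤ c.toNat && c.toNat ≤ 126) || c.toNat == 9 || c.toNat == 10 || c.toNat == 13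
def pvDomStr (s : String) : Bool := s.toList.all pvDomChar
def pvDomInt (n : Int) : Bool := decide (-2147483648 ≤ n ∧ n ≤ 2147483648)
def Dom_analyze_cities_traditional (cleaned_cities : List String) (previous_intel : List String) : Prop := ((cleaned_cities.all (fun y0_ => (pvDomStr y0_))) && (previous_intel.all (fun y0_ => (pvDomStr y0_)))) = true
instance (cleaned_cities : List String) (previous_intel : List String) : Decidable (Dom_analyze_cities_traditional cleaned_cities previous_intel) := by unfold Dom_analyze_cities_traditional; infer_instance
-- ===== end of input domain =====

-- B replaces A's three membership-scan loops with one city→(in_cleaned,in_intel) flag table and a single pass over its items (alternative decomposition, same exact sets).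

-- ===== PORT A =====
def analyze_cities_traditional (cleaned_cities : List String) (previous_intel : List String) : List String × List String × List String :=
  let cleaned_list := cleaned_cities
  let intel_list := previous_intel
  let all_cities := intel_list.foldl (fun acc city => if acc.contains city then acc else acc ++ [city]) cleaned_list
  let unique_cities := all_cities.foldl (fun acc city =>
      if (cleaned_list.contains city && !intel_list.contains city) || (intel_list.contains city && !cleaned_list.contains city)
      then acc ++ [city] else acc) []
  let high_alert := cleaned_list.foldl (fun acc city => if intel_list.contains city then acc ++ [city] else acc) []
  (PySem.Set.ofList all_cities, PySem.Set.ofList unique_cities, PySem.Set.ofList high_alert)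

-- ===== PORT B =====
def analyze_cities_traditional_alt (cleaned_cities : List String) (previous_intel : List String) : List String × List String × List String :=
  let flags1 := cleaned_cities.foldl (fun d city => d.insert city (true, false)) (PySem.Dict.empty : PySem.Dict String (Bool × Bool))
  let flags2 := previous_intel.foldl (fun d city => d.insert city ((d.getD city (false, false)).1, true)) flags1
  flags2.items.foldl
    (fun (acc : PySem.Set String × PySem.Set String × PySem.Set String) p =>
      (PySem.Set.add acc.1 p.1,
       if p.2.1 != p.2.2 then PySem.Set.add acc.2.1 p.1 else acc.2.1,
       if p.2.1 && p.2.2 then PySem.Set.add acc.2.2 p.1 else acc.2.2))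
    (PySem.Set.empty, PySem.Set.empty, PySem.Set.empty)

-- ===== PRECONDITION & SPEC =====
def Spec_analyze_cities_traditional (cleaned_cities : List String) (previous_intel : List String) (out : List String × List String × List String) : Prop := out = analyze_cities_traditional_alt cleaned_cities previous_intel
instance (cleaned_cities : List String) (previous_intel : List String) (out : List String × List String × List String) : Decidable (Spec_analyze_cities_traditional cleaned_cities previous_intel out) := by unfold Spec_analyze_cities_traditional; infer_instance

-- ===== CLAIM (what is proved, stated in full; the proofs are below) =====
def Claim_equal_analyze_cities_traditional : Prop := ∀ (cleaned_cities : List String) (previous_intel : List String), Dom_analyze_cities_traditional cleaned_cities previous_intel → Spec_analyze_cities_traditional cleaned_cities previous_intel (analyze_cities_traditional cleaned_cities previous_intel)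

-- ===== LEMMAS AND PROOFS =====

-- A's "append if not member" loop builds set-union (as a first-occurrence list).
lemma ofList_foldl_addif (l acc : List String) :
    PySem.Set.ofList (l.foldl (fun a c => if a.contains c then a else a ++ [c]) acc)
      = PySem.Set.update (PySem.Set.ofList acc) l := by
  induction l generalizing acc with
  | nil => simp [PySem.Set.update_nil]
  | cons c l ih =>
    rw [List.foldl_cons, ih, PySem.Set.update_cons]
    congr 1
    by_cases hc : acc.contains c = true
    · have hm : c ∈ PySem.Set.ofList acc :=
        Iff.mpr (PySem.Set.mem_ofList _ _) (List.contains_iff_mem.mp hc)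
      rw [if_pos hc, PySem.Set.add_of_mem hm]
    · have hm : c ∉ PySem.Set.ofList acc := fun h =>
        hc (List.contains_iff_mem.mpr (Iff.mp (PySem.Set.mem_ofList _ _) h))
      rw [if_neg hc, PySem.Set.ofList_append_singleton]

-- ofList commutes with filter.
lemma ofList_filter (p : String → Bool) (xs : List String) :
    PySem.Set.ofList (xs.filter p) = (PySem.Set.ofList xs).filter p := by
  induction xs using List.reverseRecOn with
  | nil => rfl
  | append_singleton ys x ih =>
    by_cases hp : p x = true
    · have hfx : List.filter p [x] = [x] := by simp [hp]
      by_cases hx : x ∈ ys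
      · have hx1 : x ∈ PySem.Set.ofList ys := Iff.mpr (PySem.Set.mem_ofList _ _) hx
        have hx2 : x ∈ List.filter p (PySem.Set.ofList ys) := List.mem_filter.mpr ⟨hx1, hp⟩
        rw [List.filter_append, hfx, PySem.Set.ofList_append_singleton, ih,
          PySem.Set.add_of_mem hx2, PySem.Set.ofList_append_singleton,
          PySem.Set.add_of_mem hx1]
      · have hx1 : x ∉ PySem.Set.ofList ys := fun h => hx (Iff.mp (PySem.Set.mem_ofList _ _) h)
        have hx2 : x ∉ List.filter p (PySem.Set.ofList ys) := fun h =>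
          hx1 (List.mem_of_mem_filter h)
        rw [List.filter_append, hfx, PySem.Set.ofList_append_singleton, ih,
          PySem.Set.add_of_not_mem hx2, PySem.Set.ofList_append_singleton,
          PySem.Set.add_of_not_mem hx1, List.filter_append, hfx]
    · have hfx : List.filter p [x] = [] := by simp [hp]
      by_cases hx : x ∈ PySem.Set.ofList ys
      · rw [List.filter_append, hfx, List.append_nil, ih, PySem.Set.ofList_append_singleton,
          PySem.Set.add_of_mem hx]
      · rw [List.filter_append, hfx, List.append_nil, ih, PySem.Set.ofList_append_singleton,
          PySem.Set.add_of_not_mem hx, List.filter_append, hfx, List.append_nil]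

-- lookup after B's first (cleaned) pass
lemma getD_flags1 (k : String) (l : List String) (d : PySem.Dict String (Bool × Bool)) :
    (l.foldl (fun d c => d.insert c (true, false)) d).getD k (false, false)
      = if l.contains k then (true, false) else d.getD k (false, false) := by
  induction l generalizing d with
  | nil => simp
  | cons c l ih =>
    rw [List.foldl_cons, ih, PySem.Dict.getD_insert]
    by_cases hkc : k = c
    · subst hkc
      by_cases hl : k ∈ l <;> simp [hl]
    · by_cases hl : k ∈ l <;> simp [hl, hkc]

-- lookup after B's second (intel) pass
lemma getD_flags2 (k : String) (l : List String) (d : PySem.Dict String (Bool × Bool)) :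
    (l.foldl (fun d c => d.insert c ((d.getD c (false, false)).1, true)) d).getD k (false, false)
      = if l.contains k then ((d.getD k (false, false)).1, true) else d.getD k (false, false) := by
  induction l generalizing d with
  | nil => simp
  | cons c l ih =>
    rw [List.foldl_cons, ih, PySem.Dict.getD_insert]
    by_cases hkc : k = c
    · subst hkc
      by_cases hl : k ∈ l <;> simp [hl]
    · by_cases hl : k ∈ l <;> simp [hl, hkc]

-- B's single pass over the items list, as three updates
lemma loop3 (ps : List (String × (Bool × Bool))) (a u h : PySem.Set String) :
    ps.foldl
      (fun (acc : PySem.Set String × PySem.Set String × PySem.Set String) p =>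
        (PySem.Set.add acc.1 p.1,
         if p.2.1 != p.2.2 then PySem.Set.add acc.2.1 p.1 else acc.2.1,
         if p.2.1 && p.2.2 then PySem.Set.add acc.2.2 p.1 else acc.2.2)) (a, u, h)
      = (PySem.Set.update a (ps.map (·.1)),
         PySem.Set.update u ((ps.filter (fun p => p.2.1 != p.2.2)).map (·.1)),
         PySem.Set.update h ((ps.filter (fun p => p.2.1 && p.2.2)).map (·.1))) := by
  induction ps generalizing a u h with
  | nil => simp [PySem.Set.update_nil]
  | cons p ps ih =>
    rw [List.foldl_cons, ih]
    by_cases h1 : (p.2.1 != p.2.2) = true <;>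
      by_cases h2 : (p.2.1 && p.2.2) = true <;>
        simp [h1, h2, PySem.Set.update_cons]

-- the flag table's lookup is exactly the membership pair
lemma getD_flags (cleaned intel : List String) (k : String) :
    ((intel.foldl (fun d city => d.insert city ((d.getD city (false, false)).1, true))
        (cleaned.foldl (fun d city => d.insert city (true, false))
          (PySem.Dict.empty : PySem.Dict String (Bool × Bool))))).getD k (false, false)
      = (cleaned.contains k, intel.contains k) := by
  rw [getD_flags2, getD_flags1]
  by_cases hi : k ∈ intel <;> by_cases hc : k ∈ cleaned <;>
    simp [hi, hc, PySem.Dict.getD_empty]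

-- ===== VERDICT (by name: the statement is the Claim_ definition above) =====
theorem analyze_cities_traditional_spec : Claim_equal_analyze_cities_traditional := by
  intro cleaned intel _
  unfold Spec_analyze_cities_traditional analyze_cities_traditional analyze_cities_traditional_alt
  simp only [PySem.List.foldl_append_if_eq_filter, List.nil_append]
  set K : PySem.Set String := PySem.Set.update (PySem.Set.ofList cleaned) intel with hK
  have hKnd : K.Nodup := PySem.Set.nodup_update _ _ (PySem.Set.nodup_ofList cleaned)
  set flags2 := intel.foldl (fun d city => d.insert city ((d.getD city (false, false)).1, true))
      (cleaned.foldl (fun d city => d.insert city (true, false))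
        (PySem.Dict.empty : PySem.Dict String (Bool × Bool))) with hflags2
  have hkeys : flags2.keys = K := by
    rw [hflags2, PySem.Dict.keys_foldl_insert, PySem.Dict.keys_foldl_insert,
      PySem.Dict.keys_empty, PySem.Set.update_nil_left]
  have hnd : flags2.keys.Nodup := by rw [hkeys]; exact hKnd
  have hitems : flags2.items = K.map (fun k => (k, (cleaned.contains k, intel.contains k))) := by
    rw [PySem.Dict.items_eq_map_keys flags2 hnd (false, false), hkeys]
    exact List.map_congr_left (fun k _ => by rw [hflags2, getD_flags])
  -- collapse B to three filters of K
  rw [hitems, loop3, List.filter_map, List.filter_map, List.map_map, List.map_map, List.map_map]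
  simp only [Function.comp_def]
  have hmap : ∀ l : List String, List.map (fun x => x) l = l := fun l => by simp
  simp only [hmap, PySem.Set.update_empty]
  -- collapse A to three filters of K
  rw [ofList_foldl_addif, ofList_filter, ofList_filter, ofList_foldl_addif, ← hK]
  -- componentwise
  refine congrArg₂ Prod.mk ?_ (congrArg₂ Prod.mk ?_ ?_)
  · rw [PySem.Set.ofList_eq_self_of_nodup _ hKnd]
  · have hfilt : K.filter (fun city => (cleaned.contains city && !intel.contains city)
          || (intel.contains city && !cleaned.contains city))
        = K.filter (fun k => cleaned.contains k != intel.contains k) := by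
      refine List.filter_congr (fun x _ => ?_)
      by_cases hc : x ∈ cleaned <;> by_cases hi : x ∈ intel <;> simp [hc, hi]
    rw [hfilt, PySem.Set.ofList_eq_self_of_nodup _ (hKnd.filter _)]
  · have hsplit : K.filter (fun k => cleaned.contains k && intel.contains k)
        = (PySem.Set.ofList cleaned).filter (fun city => intel.contains city) := by
      rw [hK, PySem.Set.update_eq_append_filter, List.filter_append]
      have h2 : ((PySem.Set.ofList intel).filter
            (fun y => !(PySem.Set.contains (PySem.Set.ofList cleaned) y))).filter
            (fun k => cleaned.contains k && intel.contains k) = [] := by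
        rw [List.filter_eq_nil_iff]
        intro a ha hpa
        have hmf := List.mem_filter.mp ha
        have hna : a ∉ PySem.Set.ofList cleaned := by simpa using hmf.2
        have hpa' : a ∈ cleaned ∧ a ∈ intel := by simpa using hpa
        exact hna (Iff.mpr (PySem.Set.mem_ofList _ _) hpa'.1)
      rw [h2, List.append_nil]
      refine List.filter_congr (fun x hx => ?_)
      have hm : x ∈ cleaned := Iff.mp (PySem.Set.mem_ofList _ _) hx
      simp [hm]
    rw [hsplit, PySem.Set.ofList_eq_self_of_nodup _
      ((PySem.Set.nodup_ofList cleaned).filter _)]
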